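-- pv_equiv track=rewrite | github.com/A-Stangeland/advent-of-code | 2022/day18.py | num_exposed_faces
-- ===== SOURCE A (Python) =====
-- PointCloud = set[tuple[int, int, int]]
--
-- def num_exposed_faces(points: PointCloud) -> int:
--     n = len(points) * 6
--     n_adjacent = 2 * (
--         sum(int((x - 1, y, z) in points) for (x, y, z) in points)
--         + sum(int((x, y - 1, z) in points) for (x, y, z) in points)
--         + sum(int((x, y, z - 1) in points) for (x, y, z) in points)
--     )
--     return n - n_adjacent
-- ===== SOURCE B (Python) =====
-- def num_exposed_faces(points):
--     offsets = [(1, 0, 0), (-1, 0, 0), (0, 1, 0), (0, -1, 0), (0, 0, 1), (0, 0, -1)]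
--     total = 0
--     for (x, y, z) in points:
--         for (dx, dy, dz) in offsets:
--             if (x + dx, y + dy, z + dz) not in points:
--                 total += 1
--     return total
-- ===== Notes on version B (the rewrite author's own statement) =====
-- stated objective: simpler
-- what changed: B counts exposed faces directly: for each point it checks all six axis-aligned neighbours and adds 1 per missing neighbour, replacing A's 6*n-minus-twice-the-negative-direction-adjacencies algebra.
import Mathlib
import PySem

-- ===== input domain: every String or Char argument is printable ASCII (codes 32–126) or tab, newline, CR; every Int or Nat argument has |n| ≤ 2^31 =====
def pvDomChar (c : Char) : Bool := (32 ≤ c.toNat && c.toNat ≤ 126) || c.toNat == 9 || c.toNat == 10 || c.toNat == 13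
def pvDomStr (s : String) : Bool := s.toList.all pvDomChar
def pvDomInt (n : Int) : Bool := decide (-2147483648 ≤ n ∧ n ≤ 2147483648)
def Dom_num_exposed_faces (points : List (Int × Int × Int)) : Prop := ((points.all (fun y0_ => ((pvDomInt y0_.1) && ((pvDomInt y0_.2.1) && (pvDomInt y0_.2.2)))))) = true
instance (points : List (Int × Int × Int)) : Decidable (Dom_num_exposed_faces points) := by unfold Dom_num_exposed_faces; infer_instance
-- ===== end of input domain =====

-- B counts exposed faces directly (per point, per six neighbour directions) instead of
-- A's "6*n minus twice the negative-direction adjacencies" algebra; objective: simpler.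


-- ===== PORT A =====
def num_exposed_faces (points : List (Int × Int × Int)) : Int :=
  let n : Int := (points.length : Int) * 6
  let n_adjacent : Int := 2 * (
      (points.foldl (fun acc p => acc + (if (p.1 - 1, p.2.1, p.2.2) ∈ points then (1 : Int) else 0)) 0)
    + (points.foldl (fun acc p => acc + (if (p.1, p.2.1 - 1, p.2.2) ∈ points then (1 : Int) else 0)) 0)
    + (points.foldl (fun acc p => acc + (if (p.1, p.2.1, p.2.2 - 1) ∈ points then (1 : Int) else 0)) 0))
  n - n_adjacent

-- ===== PORT B =====
def pvOffsets : List (Int × Int × Int) :=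
  [(1, 0, 0), (-1, 0, 0), (0, 1, 0), (0, -1, 0), (0, 0, 1), (0, 0, -1)]

def num_exposed_faces_alt (points : List (Int × Int × Int)) : Int :=
  points.foldl (fun total p =>
    pvOffsets.foldl (fun t d =>
      if (p.1 + d.1, p.2.1 + d.2.1, p.2.2 + d.2.2) ∉ points then t + 1 else t) total) 0

-- ===== PRECONDITION & SPEC =====
-- Pre_: the Python parameter is a set, so its list representation holds distinct elements.
def Pre_num_exposed_faces (points : List (Int × Int × Int)) : Prop := points.Nodup
instance (points : List (Int × Int × Int)) : Decidable (Pre_num_exposed_faces points) := by unfold Pre_num_exposed_faces; infer_instance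
def pvWitness_num_exposed_faces : (List (Int × Int × Int)) := [(0, 0, 0), (1, 0, 0)]

def Spec_num_exposed_faces (points : List (Int × Int × Int)) (out : Int) : Prop := out = num_exposed_faces_alt points
instance (points : List (Int × Int × Int)) (out : Int) : Decidable (Spec_num_exposed_faces points out) := by unfold Spec_num_exposed_faces; infer_instance

-- ===== CLAIM (what is proved, stated in full; the proofs are below) =====
def Claim_equal_num_exposed_faces : Prop := ∀ (points : List (Int × Int × Int)), Dom_num_exposed_faces points → Pre_num_exposed_faces points → Spec_num_exposed_faces points (num_exposed_faces points)

-- ===== LEMMAS AND PROOFS =====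

/-- fold of `acc + f p` is start plus a mapped sum. -/
theorem pv_foldl_ind {α : Type} (f : α → Int) (L : List α) (a : Int) :
    L.foldl (fun acc p => acc + f p) a = a + (L.map f).sum := by
  induction L generalizing a with
  | nil => simp
  | cons x xs ih => simp [List.foldl, ih]; ring

/-- one point's inner loop over the six offsets, written as six indicators. -/
theorem pv_inner (points : List (Int × Int × Int)) (total : Int) (p : Int × Int × Int) :
    pvOffsets.foldl (fun t d =>
        if (p.1 + d.1, p.2.1 + d.2.1, p.2.2 + d.2.2) ∉ points then t + 1 else t) total
      = total
        + ((if (p.1 + 1, p.2.1, p.2.2) ∉ points then (1:Int) else 0)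
         + (if (p.1 - 1, p.2.1, p.2.2) ∉ points then (1:Int) else 0)
         + (if (p.1, p.2.1 + 1, p.2.2) ∉ points then (1:Int) else 0)
         + (if (p.1, p.2.1 - 1, p.2.2) ∉ points then (1:Int) else 0)
         + (if (p.1, p.2.1, p.2.2 + 1) ∉ points then (1:Int) else 0)
         + (if (p.1, p.2.1, p.2.2 - 1) ∉ points then (1:Int) else 0)) := by
  have hneg : ∀ a : Int, a + -1 = a - 1 := fun a => by ring
  simp only [pvOffsets, List.foldl, add_zero, hneg]
  split_ifs <;> ring

/-- sum of an Int {0,1}-indicator over a list is the cast countP. -/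
theorem pv_sum_ind {α : Type} (P : α → Prop) [DecidablePred P] (L : List α) :
    (L.map (fun p => if P p then (1:Int) else 0)).sum = (L.countP (fun p => decide (P p)) : Int) := by
  induction L with
  | nil => simp
  | cons x xs ih =>
    by_cases h : P x <;> simp [h, ih, add_comm]

/-- countP over a nodup list is a Finset-filter cardinality. -/
theorem pv_countP_card {α : Type} [DecidableEq α] (P : α → Prop) [DecidablePred P]
    (L : List α) (h : L.Nodup) :
    L.countP (fun p => decide (P p)) = (L.toFinset.filter P).card := by
  have h1 : L.toFinset.filter P = (L.filter (fun p => decide (P p))).toFinset := by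
    ext a; simp
  rw [h1, List.card_toFinset, (h.filter _).dedup, List.countP_eq_length_filter]

/-- the symmetry at the heart of the equivalence: over a set of points, as many
    points have their `+d` neighbour present as have their `-d` neighbour present. -/
theorem pv_sym (points : List (Int × Int × Int)) (h : points.Nodup) (d : Int × Int × Int) :
    points.countP (fun p => decide ((p.1 + d.1, p.2.1 + d.2.1, p.2.2 + d.2.2) ∈ points))
      = points.countP (fun p => decide ((p.1 - d.1, p.2.1 - d.2.1, p.2.2 - d.2.2) ∈ points)) := by
  rw [pv_countP_card _ _ h, pv_countP_card _ _ h]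
  apply Finset.card_bij (fun p _ => (p.1 + d.1, p.2.1 + d.2.1, p.2.2 + d.2.2))
  · intro a ha
    simp only [Finset.mem_filter, List.mem_toFinset] at ha ⊢
    exact ⟨ha.2, by simpa using ha.1⟩
  · intro a ha b hb hab
    obtain ⟨a1, a2, a3⟩ := a; obtain ⟨b1, b2, b3⟩ := b
    simp only [Prod.mk.injEq] at hab ⊢
    omega
  · intro b hb
    simp only [Finset.mem_filter, List.mem_toFinset] at hb
    refine ⟨(b.1 - d.1, b.2.1 - d.2.1, b.2.2 - d.2.2), ?_, ?_⟩
    · simp only [Finset.mem_filter, List.mem_toFinset]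
      refine ⟨hb.2, ?_⟩
      obtain ⟨b1, b2, b3⟩ := b
      simpa using hb.1
    · obtain ⟨b1, b2, b3⟩ := b; simp

/-- symmetry in sum form, x direction. -/
theorem pv_sym_x (points : List (Int × Int × Int)) (h : points.Nodup) :
    (points.map (fun p => if (p.1 + 1, p.2.1, p.2.2) ∈ points then (1:Int) else 0)).sum
      = (points.map (fun p => if (p.1 - 1, p.2.1, p.2.2) ∈ points then (1:Int) else 0)).sum := by
  rw [pv_sum_ind, pv_sum_ind]
  have := pv_sym points h (1, 0, 0)
  simp only [add_zero, sub_zero] at this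
  exact congrArg _ this

/-- symmetry in sum form, y direction. -/
theorem pv_sym_y (points : List (Int × Int × Int)) (h : points.Nodup) :
    (points.map (fun p => if (p.1, p.2.1 + 1, p.2.2) ∈ points then (1:Int) else 0)).sum
      = (points.map (fun p => if (p.1, p.2.1 - 1, p.2.2) ∈ points then (1:Int) else 0)).sum := by
  rw [pv_sum_ind, pv_sum_ind]
  have := pv_sym points h (0, 1, 0)
  simp only [add_zero, sub_zero] at this
  exact congrArg _ this

/-- symmetry in sum form, z direction. -/
theorem pv_sym_z (points : List (Int × Int × Int)) (h : points.Nodup) :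
    (points.map (fun p => if (p.1, p.2.1, p.2.2 + 1) ∈ points then (1:Int) else 0)).sum
      = (points.map (fun p => if (p.1, p.2.1, p.2.2 - 1) ∈ points then (1:Int) else 0)).sum := by
  rw [pv_sum_ind, pv_sum_ind]
  have := pv_sym points h (0, 0, 1)
  simp only [add_zero, sub_zero] at this
  exact congrArg _ this

theorem pv_notin_ind (P : Prop) [Decidable P] :
    (if ¬ P then (1:Int) else 0) = 1 - (if P then (1:Int) else 0) := by
  split_ifs <;> simp_all

/-- B's per-point sum of six "exposed" indicators, as 6·n minus the six membership sums. -/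
theorem pv_B_sum (points L : List (Int × Int × Int)) :
    (L.map (fun p =>
        ((if (p.1 + 1, p.2.1, p.2.2) ∉ points then (1:Int) else 0)
       + (if (p.1 - 1, p.2.1, p.2.2) ∉ points then (1:Int) else 0)
       + (if (p.1, p.2.1 + 1, p.2.2) ∉ points then (1:Int) else 0)
       + (if (p.1, p.2.1 - 1, p.2.2) ∉ points then (1:Int) else 0)
       + (if (p.1, p.2.1, p.2.2 + 1) ∉ points then (1:Int) else 0)
       + (if (p.1, p.2.1, p.2.2 - 1) ∉ points then (1:Int) else 0)))).sum
      = 6 * (L.length : Int)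
        - ((L.map (fun p => if (p.1 + 1, p.2.1, p.2.2) ∈ points then (1:Int) else 0)).sum
         + (L.map (fun p => if (p.1 - 1, p.2.1, p.2.2) ∈ points then (1:Int) else 0)).sum
         + (L.map (fun p => if (p.1, p.2.1 + 1, p.2.2) ∈ points then (1:Int) else 0)).sum
         + (L.map (fun p => if (p.1, p.2.1 - 1, p.2.2) ∈ points then (1:Int) else 0)).sum
         + (L.map (fun p => if (p.1, p.2.1, p.2.2 + 1) ∈ points then (1:Int) else 0)).sum
         + (L.map (fun p => if (p.1, p.2.1, p.2.2 - 1) ∈ points then (1:Int) else 0)).sum) := by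
  induction L with
  | nil => simp
  | cons x xs ih =>
    simp only [List.map_cons, List.sum_cons, List.length_cons]
    rw [ih]
    simp only [pv_notin_ind]
    push_cast
    ring

-- ===== VERDICT (by name: the statement is the Claim_ definition above) =====
theorem num_exposed_faces_spec : Claim_equal_num_exposed_faces := by
  intro points _ hpre
  unfold Spec_num_exposed_faces num_exposed_faces num_exposed_faces_alt
  have hb : points.foldl (fun total p =>
      pvOffsets.foldl (fun t d =>
        if (p.1 + d.1, p.2.1 + d.2.1, p.2.2 + d.2.2) ∉ points then t + 1 else t) total) 0
      = points.foldl (fun total p => total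
        + ((if (p.1 + 1, p.2.1, p.2.2) ∉ points then (1:Int) else 0)
         + (if (p.1 - 1, p.2.1, p.2.2) ∉ points then (1:Int) else 0)
         + (if (p.1, p.2.1 + 1, p.2.2) ∉ points then (1:Int) else 0)
         + (if (p.1, p.2.1 - 1, p.2.2) ∉ points then (1:Int) else 0)
         + (if (p.1, p.2.1, p.2.2 + 1) ∉ points then (1:Int) else 0)
         + (if (p.1, p.2.1, p.2.2 - 1) ∉ points then (1:Int) else 0))) 0 := by
    congr 1
    funext total p
    exact pv_inner points total p
  rw [hb]
  simp only [pv_foldl_ind, zero_add]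
  rw [pv_B_sum points points, ← pv_sym_x points hpre, ← pv_sym_y points hpre,
      ← pv_sym_z points hpre]
  ring
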